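-- pv_equiv track=rewrite | github.com/tgh561/AOIS | Lab_2/dummy_vars.py | get_dummy_vars
-- ===== SOURCE A (Python) =====
-- def get_dummy_vars(table, vars_list):
--     n = len(vars_list)
--     dummies = []
--     for i in range(n):
--         is_dummy = True
--         bit = 1 << i
--         for mask in range(1 << n):
--             if (mask & bit) == 0:
--                 if table[mask] != table[mask | bit]:
--                     is_dummy = False
--                     break
--         if is_dummy:
--             dummies.append(vars_list[i])
--     return dummies
-- ===== SOURCE B (Python) =====
-- def get_dummy_vars(table, vars_list):
--     n = len(vars_list)
--
--     def rec(base, k):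
--         # dummy statuses for variables 0..k-1 over the 2^k truth-table rows
--         # starting at row `base` (divide & conquer on the highest variable:
--         # it is dummy iff the two half-blocks are equal lists, and a lower
--         # variable is dummy iff it is dummy in both halves)
--         if k == 0:
--             return []
--         half = 1 << (k - 1)
--         low = [table[base + j] for j in range(half)]
--         high = [table[base + half + j] for j in range(half)]
--         status_low = rec(base, k - 1)
--         status_high = rec(base + half, k - 1)
--         return [a and b for a, b in zip(status_low, status_high)] + [low == high]
--
--     status = rec(0, n)
--     return [v for v, ok in zip(vars_list, status) if ok]
-- ===== Notes on version B (the rewrite author's own statement) =====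
-- stated objective: alternative
-- what changed: Replaces the per-variable bit-mask scan of the whole truth table with a divide-and-conquer recursion that splits the table's row block in halves on the highest variable (dummy iff the two half-blocks are equal lists) and intersects the recursive dummy statuses of the lower variables, then filters the variable list by the resulting status array.
-- outside the precondition, e.g. on get_dummy_vars([0, 1, 2], ['x', 'y']): A returns [], B raises IndexError
import Mathlib
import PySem

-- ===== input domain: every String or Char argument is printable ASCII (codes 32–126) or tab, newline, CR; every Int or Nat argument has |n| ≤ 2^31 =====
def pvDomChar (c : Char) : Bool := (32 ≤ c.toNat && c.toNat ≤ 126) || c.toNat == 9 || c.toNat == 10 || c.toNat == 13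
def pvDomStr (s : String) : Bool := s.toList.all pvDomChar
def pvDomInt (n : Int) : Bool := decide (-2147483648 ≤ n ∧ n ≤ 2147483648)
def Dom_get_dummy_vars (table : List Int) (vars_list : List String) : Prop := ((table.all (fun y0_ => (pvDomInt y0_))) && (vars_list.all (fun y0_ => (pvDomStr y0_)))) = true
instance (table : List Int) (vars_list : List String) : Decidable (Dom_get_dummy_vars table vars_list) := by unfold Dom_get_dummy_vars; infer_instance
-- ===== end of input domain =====

-- B replaces A's per-variable bit-mask scan of the truth table with a divide-and-conquer
-- recursion: split the table in halves on the highest variable (dummy iff the halves are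
-- equal lists) and intersect the recursive statuses of the lower variables
-- (alternative decomposition; same asymptotic cost). Return values agree on Pre_.
-- Indices in A are nonnegative (masks), so Python's table[j] is List.getD j 0 on every
-- input Pre_ admits (out-of-range would raise IndexError and is excluded by Pre_).

-- ===== PORT A =====
-- inner loop of A over the remaining masks, with the early `break` on a mismatch
def pvScanA (table : List Int) (bit : Nat) : List Nat → Bool
  | [] => true
  | m :: rest =>
    if m &&& bit == 0 then
      if table.getD m 0 != table.getD (m ||| bit) 0 then false
      else pvScanA table bit rest
    else pvScanA table bit rest

def get_dummy_vars (table : List Int) (vars_list : List String) : List String :=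
  let n := vars_list.length
  (List.range n).foldl (fun dummies i =>
    if pvScanA table (1 <<< i) (List.range (1 <<< n)) then dummies ++ [vars_list.getD i ""]
    else dummies) []

-- ===== PORT B =====
-- `rec` of Source B: dummy statuses for variables 0..k-1 over the 2^k rows from `base`.
-- table[base + j] has a nonnegative in-range index on every input Pre_ admits, so it
-- is List.getD (out of range would raise IndexError, excluded by Pre_).
def pvRec (table : List Int) (base : Nat) : Nat → List Bool
  | 0 => []
  | Nat.succ k =>
    let half := 1 <<< k
    let low := (List.range half).map (fun j => table.getD (base + j) 0)
    let high := (List.range half).map (fun j => table.getD (base + half + j) 0)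
    let status_low := pvRec table base k
    let status_high := pvRec table (base + half) k
    (status_low.zip status_high).map (fun p => p.1 && p.2) ++ [decide (low = high)]

def get_dummy_vars_alt (table : List Int) (vars_list : List String) : List String :=
  let n := vars_list.length
  let status := pvRec table 0 n
  ((vars_list.zip status).filter (fun p => p.2)).map (fun p => p.1)

-- ===== PRECONDITION & SPEC =====
-- Pre_ excludes tables shorter than 2^(number of variables) (malformed truth tables):
-- there Python A's table[mask] indexing raises IndexError on most inputs, and on the
-- rare such inputs where A's early break lets it return, B itself raises IndexError.
def Pre_get_dummy_vars (table : List Int) (vars_list : List String) : Prop :=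
  2 ^ vars_list.length ≤ table.length
instance (table : List Int) (vars_list : List String) : Decidable (Pre_get_dummy_vars table vars_list) := by unfold Pre_get_dummy_vars; infer_instance

def pvWitness_get_dummy_vars : List Int × List String := ([0, 1, 0, 1], ["a", "b"])

def Spec_get_dummy_vars (table : List Int) (vars_list : List String) (out : List String) : Prop := out = get_dummy_vars_alt table vars_list
instance (table : List Int) (vars_list : List String) (out : List String) : Decidable (Spec_get_dummy_vars table vars_list out) := by unfold Spec_get_dummy_vars; infer_instance

-- ===== CLAIM =====
def Claim_equal_get_dummy_vars : Prop := ∀ (table : List Int) (vars_list : List String), Dom_get_dummy_vars table vars_list → Pre_get_dummy_vars table vars_list → Spec_get_dummy_vars table vars_list (get_dummy_vars table vars_list)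

-- ===== LEMMAS AND PROOFS =====
-- the per-(mask, variable) test both sides reduce to
def pvCond (seg : List Int) (bit : Nat) (m : Nat) : Bool :=
  !((m &&& bit == 0) && (seg.getD m 0 != seg.getD (m ||| bit) 0))

theorem pvScanA_eq_all (table : List Int) (bit : Nat) (ms : List Nat) :
    pvScanA table bit ms = ms.all (pvCond table bit) := by
  induction ms with
  | nil => rfl
  | cons m rest ih =>
    simp only [pvScanA, List.all_cons, pvCond]
    cases h1 : (m &&& bit == 0) <;>
      cases h2 : (table.getD m 0 != table.getD (m ||| bit) 0) <;>
        simp [ih]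

-- A's accumulator loop is filter-then-map over the index range
theorem pvFoldl_append_if {α β : Type} (p : α → Bool) (f : α → β) (L : List α) (acc : List β) :
    L.foldl (fun acc x => if p x then acc ++ [f x] else acc) acc
      = acc ++ (L.filter p).map f := by
  induction L generalizing acc with
  | nil => simp
  | cons a L ih =>
    simp only [List.foldl_cons, List.filter_cons]
    by_cases ha : p a
    · simp [ha, ih]
    · simp [ha, ih]

-- B's zip comprehension is filter-then-map over the index range
theorem pvZip_filter_map {α : Type} (d : α) (vars : List α) (status : List Bool) :
    ((vars.zip status).filter (fun p => p.2)).map (fun p => p.1)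
      = ((List.range vars.length).filter (fun i => status.getD i false)).map
          (fun i => vars.getD i d) := by
  induction vars generalizing status with
  | nil => simp
  | cons v vs ih =>
    cases status with
    | nil => simp [List.getD]
    | cons b bs =>
      cases b <;>
        simp [List.range_succ_eq_map, List.filter_map, List.map_map, Function.comp_def,
          List.getD, ih bs]

-- bit arithmetic
theorem pvOrPow (m k : Nat) (h : m < 2 ^ k) : m ||| 2 ^ k = m + 2 ^ k := by
  apply Nat.eq_of_testBit_eq
  intro j
  rcases lt_trichotomy j k with hj | hj | hj
  · rw [Nat.testBit_or, Nat.testBit_two_pow, (Nat.add_comm m (2 ^ k) ▸ rfl :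
        m + 2 ^ k = 2 ^ k + m), Nat.testBit_two_pow_add_gt hj]
    simp [Nat.ne_of_gt hj]
  · subst hj
    rw [Nat.testBit_or, Nat.testBit_two_pow_self, Nat.add_comm, Nat.testBit_two_pow_add_eq,
      Nat.testBit_lt_two_pow h]
    rfl
  · have h1 : m.testBit j = false := Nat.testBit_lt_two_pow (lt_of_lt_of_le h
      (Nat.pow_le_pow_right (by norm_num) (Nat.le_of_lt hj)))
    have h2 : (m + 2 ^ k).testBit j = false := Nat.testBit_lt_two_pow (by
      calc m + 2 ^ k < 2 ^ k + 2 ^ k := by omega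
        _ = 2 ^ (k + 1) := by ring
        _ ≤ 2 ^ j := Nat.pow_le_pow_right (by norm_num) hj)
    rw [Nat.testBit_or, Nat.testBit_two_pow, h1, h2]
    simp
    omega

theorem pvAndPow (m i : Nat) : (m &&& 2 ^ i == 0) = !(m.testBit i) := by
  cases h : m.testBit i <;> simp [Nat.and_two_pow, h, Nat.pow_eq_zero]

-- pointwise-on-members congruence for List.all
theorem pvAllCongrMem {α : Type} (l : List α) (p q : α → Bool)
    (h : ∀ a ∈ l, p a = q a) : l.all p = l.all q := by
  induction l with
  | nil => rfl
  | cons a l ih =>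
    simp only [List.all_cons, h a (List.mem_cons_self ..),
      ih (fun b hb => h b (List.mem_cons_of_mem a hb))]

theorem pvRec_length (table : List Int) (base k : Nat) : (pvRec table base k).length = k := by
  induction k generalizing base with
  | zero => rfl
  | succ k ih =>
    simp [pvRec, List.length_zip, ih]

theorem pvRangeMapGetD (f : Nat → Int) (N m : Nat) (hm : m < N) :
    ((List.range N).map f).getD m 0 = f m := by
  have h1 : m < ((List.range N).map f).length := by simpa using hm
  rw [List.getD_eq_getElem _ _ h1, List.getElem_map, List.getElem_range]

theorem pvZipMapGetD (xs ys : List Bool) (i : Nat) (hx : i < xs.length) (hy : i < ys.length) :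
    ((xs.zip ys).map (fun p => p.1 && p.2)).getD i false
      = (xs.getD i false && ys.getD i false) := by
  have hz : i < (xs.zip ys).length := by simp [List.length_zip]; omega
  have hmz : i < ((xs.zip ys).map (fun p => p.1 && p.2)).length := by simpa using hz
  rw [List.getD_eq_getElem _ _ hmz, List.getD_eq_getElem _ _ hx, List.getD_eq_getElem _ _ hy,
    List.getElem_map, List.getElem_zip]

theorem pvListEqAll (ls hs : List Int) (h : ls.length = hs.length) :
    decide (ls = hs) = (List.range ls.length).all (fun m => ls.getD m 0 == hs.getD m 0) := by
  cases hb : (List.range ls.length).all (fun m => ls.getD m 0 == hs.getD m 0) with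
  | false =>
    obtain ⟨i, hi, hne⟩ := List.all_eq_false.mp hb
    have hne' : ls ≠ hs := fun e => hne (by simp [e])
    simp [hne']
  | true =>
    have heq : ls = hs := List.ext_getElem h (fun i h1 h2 => by
      have := List.all_eq_true.mp hb i (List.mem_range.mpr h1)
      simp only [List.getD_eq_getElem _ _ h1, List.getD_eq_getElem _ _ h2, beq_iff_eq] at this
      exact this)
    simp [heq]

-- the per-(mask, variable) test relative to a block of rows starting at `base`
def pvCondAt (table : List Int) (base bit m : Nat) : Bool :=
  !((m &&& bit == 0) && (table.getD (base + m) 0 != table.getD (base + (m ||| bit)) 0))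

theorem pvRec_getD (k : Nat) (table : List Int) (base : Nat)
    (i : Nat) (hi : i < k) :
    (pvRec table base k).getD i false = (List.range (2 ^ k)).all (pvCondAt table base (2 ^ i)) := by
  induction k generalizing base i with
  | zero => omega
  | succ k ih =>
    have hp2 : (2:Nat) ^ (k + 1) = 2 ^ k + 2 ^ k := by ring
    show (((pvRec table base k).zip (pvRec table (base + 1 <<< k) k)).map (fun p => p.1 && p.2)
        ++ [decide ((List.range (1 <<< k)).map (fun j => table.getD (base + j) 0)
              = (List.range (1 <<< k)).map (fun j => table.getD (base + 1 <<< k + j) 0))]).getD i false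
      = (List.range (2 ^ (k + 1))).all (pvCondAt table base (2 ^ i))
    simp only [Nat.one_shiftLeft]
    have hzm : (((pvRec table base k).zip (pvRec table (base + 2 ^ k) k)).map
        (fun p => p.1 && p.2)).length = k := by
      simp [List.length_zip, pvRec_length]
    rw [hp2, List.range_add, List.all_append, List.all_map]
    simp only [Function.comp_def]
    by_cases hik : i = k
    · subst hik
      rw [List.getD_append_right _ _ _ _ (by rw [hzm])]
      rw [hzm, Nat.sub_self]
      show decide ((List.range (2 ^ i)).map (fun j => table.getD (base + j) 0)
          = (List.range (2 ^ i)).map (fun j => table.getD (base + 2 ^ i + j) 0)) = _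
      rw [pvListEqAll _ _ (by simp), List.length_map, List.length_range]
      have e1 : (List.range (2 ^ i)).all
          (fun m => ((List.range (2 ^ i)).map (fun j => table.getD (base + j) 0)).getD m 0
            == ((List.range (2 ^ i)).map (fun j => table.getD (base + 2 ^ i + j) 0)).getD m 0)
          = (List.range (2 ^ i)).all (pvCondAt table base (2 ^ i)) := by
        apply pvAllCongrMem
        intro m hm
        have hm' : m < 2 ^ i := List.mem_range.mp hm
        unfold pvCondAt
        rw [pvRangeMapGetD _ _ _ hm', pvRangeMapGetD _ _ _ hm',
          pvAndPow, Nat.testBit_lt_two_pow hm', pvOrPow m i hm',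
          Nat.add_comm m (2 ^ i), ← Nat.add_assoc]
        simp [bne]
      have e2 : (List.range (2 ^ i)).all (fun x => pvCondAt table base (2 ^ i) (2 ^ i + x)) = true := by
        rw [List.all_eq_true]
        intro m hm
        unfold pvCondAt
        rw [pvAndPow, Nat.testBit_two_pow_add_eq,
          Nat.testBit_lt_two_pow (List.mem_range.mp hm)]
        simp
      rw [e1, e2, Bool.and_true]
    · have hik' : i < k := by omega
      rw [List.getD_append _ _ _ _ (by rw [hzm]; omega)]
      rw [pvZipMapGetD _ _ _ (by rw [pvRec_length]; omega) (by rw [pvRec_length]; omega),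
        ih base i hik', ih (base + 2 ^ k) i hik']
      have hpi : (2:Nat) ^ i < 2 ^ k := Nat.pow_lt_pow_right (by norm_num) hik'
      have e2 : (List.range (2 ^ k)).all (fun x => pvCondAt table base (2 ^ i) (2 ^ k + x))
          = (List.range (2 ^ k)).all (pvCondAt table (base + 2 ^ k) (2 ^ i)) := by
        apply pvAllCongrMem
        intro m hm
        have hm' : m < 2 ^ k := List.mem_range.mp hm
        have hor : m ||| 2 ^ i < 2 ^ k := Nat.or_lt_two_pow hm' hpi
        have hadd : 2 ^ k + m = m ||| 2 ^ k := by rw [pvOrPow m k hm', Nat.add_comm]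
        have horr : (2 ^ k + m) ||| 2 ^ i = 2 ^ k + (m ||| 2 ^ i) := by
          rw [hadd, Nat.or_assoc, Nat.or_comm (2 ^ k), ← Nat.or_assoc,
            pvOrPow _ k hor, Nat.add_comm]
        unfold pvCondAt
        rw [pvAndPow, pvAndPow, Nat.testBit_two_pow_add_gt hik', horr,
          ← Nat.add_assoc, ← Nat.add_assoc]
      rw [e2]

-- ===== VERDICT =====
theorem get_dummy_vars_spec : Claim_equal_get_dummy_vars := by
  intro table vars_list _ _
  unfold Spec_get_dummy_vars get_dummy_vars get_dummy_vars_alt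
  rw [pvFoldl_append_if, pvZip_filter_map "", List.nil_append]
  apply congrArg
  apply List.filter_congr
  intro i hi
  have hi' : i < vars_list.length := List.mem_range.mp hi
  rw [pvScanA_eq_all, Nat.one_shiftLeft, Nat.one_shiftLeft]
  rw [pvRec_getD vars_list.length table 0 i hi']
  apply pvAllCongrMem
  intro m _
  unfold pvCond pvCondAt
  rw [Nat.zero_add, Nat.zero_add]
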